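-- pv_equiv track=rewrite | github.com/nevaliashka-no-hacker/algorithms_and_structures | dz_sem2/101.py | counter_window
-- ===== SOURCE A (Python) =====
-- from collections import Counter
--
-- def counter_window(s, k):
--     if len(s) < k:
--         return None
--
--     left = 0
--     right = k
--     result = 0
--
--     while right != len(s) + 1:
--         window = s[left:right]
--         cnt = Counter(window)
--         flag = 0
--         for ch in cnt:
--             if cnt[ch] != 1:
--                 flag = 1
--         if not flag:
--             result += 1
--
--         left += 1
--         right += 1
--
--     return result
-- ===== SOURCE B (Python) =====
-- def counter_window(s, k):
--     n = len(s)
--     if n < k: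
--         return None
--     # running character counts of the current window and the number of
--     # distinct characters occurring more than once in it
--     cnt = {}
--     dups = 0
--     for ch in s[:k]:
--         c = cnt.get(ch, 0) + 1
--         cnt[ch] = c
--         if c == 2:
--             dups += 1
--     result = 0
--     for l in range(n - k + 1):
--         if dups == 0:
--             result += 1
--         if l + k < n:
--             out = s[l]
--             c = cnt.get(out, 0) - 1
--             cnt[out] = c
--             if c == 1:
--                 dups -= 1
--             ch = s[l + k]
--             c = cnt.get(ch, 0) + 1
--             cnt[ch] = c
--             if c == 2:
--                 dups += 1
--     return result
-- ===== Notes on version B (the rewrite author's own statement) =====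
-- stated objective: faster
-- what changed: Replaced the per-window slice + Counter rebuild (O(k) work per window) by an incremental sliding window that maintains running character counts and a counter of duplicated characters, O(1) amortised work per slide.
-- outside the precondition, e.g. on counter_window('aab', -1): A returns 4, B raises IndexError
import Mathlib
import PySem

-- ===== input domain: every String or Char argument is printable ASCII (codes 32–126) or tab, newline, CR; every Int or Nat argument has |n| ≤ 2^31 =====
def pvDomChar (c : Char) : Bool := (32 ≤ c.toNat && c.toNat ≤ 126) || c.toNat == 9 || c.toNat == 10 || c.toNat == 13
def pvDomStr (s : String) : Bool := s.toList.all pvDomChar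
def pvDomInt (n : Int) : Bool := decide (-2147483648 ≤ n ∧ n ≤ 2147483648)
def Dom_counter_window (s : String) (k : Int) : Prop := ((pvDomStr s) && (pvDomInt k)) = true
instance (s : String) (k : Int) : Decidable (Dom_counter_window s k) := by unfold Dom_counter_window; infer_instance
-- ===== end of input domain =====

-- B replaces A's per-window slice-and-Counter rebuild by an incremental sliding window
-- with running character counts and a duplicate counter (objective: faster).

-- ===== PORT A =====
-- 'while right != len(s) + 1' with right increasing by 1 from k ≤ len(s); the final
-- else-branch is unreachable from the entry point (there Python's loop would not terminate).
def counterWindowLoopA (cs : List Char) (left right result : Int) : Int :=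
  if right = (cs.length : Int) + 1 then result
  else if h : right < (cs.length : Int) + 1 then
    let window := PySem.List.slice cs (some left) (some right)
    let cnt := PySem.Dict.counter window
    let flag := cnt.keys.foldl (fun f ch => if ¬ (cnt.getD ch 0 = 1) then (1 : Int) else f) 0
    counterWindowLoopA cs (left + 1) (right + 1) (if flag = 0 then result + 1 else result)
  else result
termination_by ((cs.length : Int) + 1 - right).toNat
decreasing_by omega

def counter_window (s : String) (k : Int) : Option Int :=
  if (s.toList.length : Int) < k then none
  else some (counterWindowLoopA s.toList 0 k 0)

-- ===== PORT B =====
-- body of "for ch in s[:k]": build counts/dups of the first window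
def counterWindowInitStepB (st : PySem.Dict Char Int × Int) (ch : Char) : PySem.Dict Char Int × Int :=
  let c := st.1.getD ch 0 + 1
  (st.1.insert ch c, if c = 2 then st.2 + 1 else st.2)

def counterWindowInitB (cs : List Char) (k : Int) : PySem.Dict Char Int × Int :=
  (PySem.List.slice cs none (some k)).foldl counterWindowInitStepB (PySem.Dict.empty, 0)

-- body of "for l in range(n - k + 1)"; s[l] / s[l + k] are read with pyGetD (exact here:
-- under Pre_counter_window both indices are in range whenever this branch is taken)
def counterWindowStepB (cs : List Char) (k : Int)
    (st : PySem.Dict Char Int × Int × Int) (l : Int) : PySem.Dict Char Int × Int × Int :=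
  let result := if st.2.1 = 0 then st.2.2 + 1 else st.2.2
  if l + k < (cs.length : Int) then
    let out := PySem.List.pyGetD cs l ' '
    let c := st.1.getD out 0 - 1
    let cnt := st.1.insert out c
    let dups := if c = 1 then st.2.1 - 1 else st.2.1
    let ch := PySem.List.pyGetD cs (l + k) ' '
    let c2 := cnt.getD ch 0 + 1
    (cnt.insert ch c2, (if c2 = 2 then dups + 1 else dups), result)
  else (st.1, st.2.1, result)

def counter_window_alt (s : String) (k : Int) : Option Int :=
  let cs := s.toList
  if (cs.length : Int) < k then none
  else
    let init := counterWindowInitB cs k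
    let fin := (PySem.List.pyRange 0 ((cs.length : Int) - k + 1) 1).foldl
      (counterWindowStepB cs k) (init.1, init.2, 0)
    some fin.2.2

-- ===== PRECONDITION & SPEC =====
-- Pre_ excludes k < 0, a corner no caller of a window-counting routine specifies: there A's
-- negative right slice bound wraps around (an accident of s[left:right]) while B's sliding
-- window indexes s[l] out of range and raises IndexError.
def Pre_counter_window (s : String) (k : Int) : Prop := 0 ≤ k
instance (s : String) (k : Int) : Decidable (Pre_counter_window s k) := by unfold Pre_counter_window; infer_instance
def pvWitness_counter_window : String × Int := ("abcab", 2)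

def Spec_counter_window (s : String) (k : Int) (out : Option Int) : Prop := out = counter_window_alt s k
instance (s : String) (k : Int) (out : Option Int) : Decidable (Spec_counter_window s k out) := by unfold Spec_counter_window; infer_instance

-- ===== CLAIM (what is proved, stated in full; the proofs are below) =====
def Claim_equal_counter_window : Prop := ∀ (s : String) (k : Int), Dom_counter_window s k → Pre_counter_window s k → Spec_counter_window s k (counter_window s k)

-- ===== LEMMAS AND PROOFS =====

-- number of distinct characters occurring more than once (what B's 'dups' tracks)
def pvDupF (w : List Char) : Int := ∑ c ∈ w.toFinset, (if 1 < List.count c w then (1 : Int) else 0)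

lemma pvDupF_nil : pvDupF [] = 0 := by simp [pvDupF]

lemma pvDupF_perm {w w' : List Char} (h : w.Perm w') : pvDupF w = pvDupF w' := by
  unfold pvDupF
  rw [List.toFinset_eq_of_perm _ _ h]
  exact Finset.sum_congr rfl (fun c _ => by rw [h.count_eq])

lemma pvDupF_cons (x : Char) (t : List Char) :
    pvDupF (x :: t) = pvDupF t + (if List.count x t = 1 then 1 else 0) := by
  unfold pvDupF
  by_cases hx : x ∈ t
  · have hS : (x :: t).toFinset = t.toFinset := by
      simp [List.toFinset_cons, Finset.insert_eq_self.mpr (List.mem_toFinset.mpr hx)]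
    rw [hS]
    have hmem : x ∈ t.toFinset := List.mem_toFinset.mpr hx
    rw [← Finset.sum_erase_add _ _ hmem, ← Finset.sum_erase_add _ (fun c => if 1 < List.count c t then (1:Int) else 0) hmem]
    have hpt : ∀ c ∈ t.toFinset.erase x,
        (if 1 < List.count c (x :: t) then (1:Int) else 0) = (if 1 < List.count c t then (1:Int) else 0) := by
      intro c hc
      have hne : ¬ (x = c) := fun h => (Finset.mem_erase.mp hc).1 h.symm
      rw [List.count_cons]
      simp [hne]
    rw [Finset.sum_congr rfl hpt]
    have hcx : 1 ≤ List.count x t := List.count_pos_iff.mpr hx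
    have hkey : (if 1 < List.count x (x :: t) then (1:Int) else 0)
        = (if 1 < List.count x t then (1:Int) else 0) + (if List.count x t = 1 then (1:Int) else 0) := by
      rw [List.count_cons]
      simp only [BEq.rfl, if_true]
      split_ifs <;> omega
    rw [hkey]; ring
  · have hS : (x :: t).toFinset = insert x t.toFinset := by simp [List.toFinset_cons]
    rw [hS]
    have hxS : x ∉ t.toFinset := fun h => hx (List.mem_toFinset.mp h)
    rw [Finset.sum_insert hxS]
    have hc0 : List.count x t = 0 := List.count_eq_zero.mpr hx
    have hpt : ∀ c ∈ t.toFinset,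
        (if 1 < List.count c (x :: t) then (1:Int) else 0) = (if 1 < List.count c t then (1:Int) else 0) := by
      intro c hc
      have hne : ¬ (x = c) := fun h => hxS (h ▸ hc)
      rw [List.count_cons]
      simp [hne]
    rw [Finset.sum_congr rfl hpt]
    rw [List.count_cons]
    simp [hc0]

lemma pvDupF_append_singleton (w : List Char) (x : Char) :
    pvDupF (w ++ [x]) = pvDupF w + (if List.count x w = 1 then 1 else 0) := by
  rw [pvDupF_perm (List.perm_append_singleton x w), pvDupF_cons]

lemma pvDupF_eq_zero_iff (w : List Char) : pvDupF w = 0 ↔ w.Nodup := by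
  unfold pvDupF
  rw [Finset.sum_eq_zero_iff_of_nonneg (fun c _ => by positivity)]
  constructor
  · intro h
    rw [List.nodup_iff_count_le_one]
    intro a
    by_cases ha : a ∈ w
    · have := h a (List.mem_toFinset.mpr ha)
      by_contra hgt
      simp [Nat.lt_of_not_le (fun hle => hgt hle)] at this
    · simp [List.count_eq_zero.mpr ha]
  · intro h c hc
    have := List.nodup_iff_count_le_one.mp h c
    simp [Nat.not_lt.mpr this]

lemma pvFlagFold (p : Char → Prop) [DecidablePred p] :
    ∀ (l : List Char) (a : Int),
      l.foldl (fun f ch => if p ch then (1 : Int) else f) a = if ∃ c ∈ l, p c then 1 else a := by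
  intro l
  induction l with
  | nil => intro a; simp
  | cons x t ih =>
    intro a
    rw [List.foldl_cons, ih]
    by_cases hx : p x
    · simp [hx]
    · by_cases ht : ∃ c ∈ t, p c
      · simp [hx, ht]
      · simp [hx, ht]

lemma pvFlag_eq_zero_iff (w : List Char) :
    ((PySem.Dict.counter w).keys.foldl
        (fun f ch => if ¬ ((PySem.Dict.counter w).getD ch 0 = 1) then (1 : Int) else f) 0 = 0)
      ↔ w.Nodup := by
  rw [pvFlagFold (fun ch => ¬ ((PySem.Dict.counter w).getD ch 0 = 1))]
  rw [PySem.Dict.keys_counter]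
  by_cases h : ∃ c ∈ PySem.Set.ofList w, ¬ ((PySem.Dict.counter w).getD c 0 = 1)
  · rw [if_pos h]
    obtain ⟨c, hc, hne⟩ := h
    rw [PySem.Dict.getD_counter] at hne
    constructor
    · intro h10; exact absurd h10 (by norm_num)
    · intro hnd
      have := List.nodup_iff_count_eq_one.mp hnd c ((PySem.Set.mem_ofList w c).mp hc)
      exact absurd (by exact_mod_cast this) hne
  · rw [if_neg h]
    push Not at h
    constructor
    · intro _
      rw [List.nodup_iff_count_eq_one]
      intro a ha
      have := h a ((PySem.Set.mem_ofList w a).mpr ha)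
      rw [PySem.Dict.getD_counter] at this
      exact_mod_cast this
    · intro _; rfl

lemma pvWin_head (cs : List Char) (k l : Nat) (hk : 1 ≤ k) (hl : l < cs.length) :
    (cs.drop l).take k = cs[l] :: (cs.drop (l+1)).take (k - 1) := by
  obtain ⟨j, rfl⟩ : ∃ j, k = j + 1 := ⟨k - 1, by omega⟩
  rw [List.drop_eq_getElem_cons hl, List.take_succ_cons]
  norm_num

lemma pvWin_next (cs : List Char) (k l : Nat) (hk : 1 ≤ k) (h : l + k < cs.length) :
    (cs.drop (l+1)).take k = (cs.drop (l + 1)).take (k - 1) ++ [cs[l + k]] := by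
  obtain ⟨j, rfl⟩ : ∃ j, k = j + 1 := ⟨k - 1, by omega⟩
  rw [List.take_add_one]
  have hlt : j < (cs.drop (l+1)).length := by simp; omega
  rw [List.getElem?_eq_getElem hlt]
  simp [List.getElem_drop]
  congr 1
  omega

lemma pvLoopA_eq (cs : List Char) (k : Nat) :
    ∀ (m l : Nat) (acc : Int), l + m + k = cs.length →
      counterWindowLoopA cs (l : Int) ((l : Int) + (k : Int)) acc
        = acc + (((List.range' l (m + 1)).countP (fun i => decide ((cs.drop i).take k).Nodup) : Nat) : Int) := by
  intro m
  induction m with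
  | zero =>
    intro l acc h
    rw [counterWindowLoopA]
    rw [if_neg (by omega)]
    rw [dif_pos (by omega : (l:Int)+(k:Int) < (cs.length:Int)+1)]
    simp only [PySem.List.slice_natCast_add]
    rw [counterWindowLoopA]
    rw [if_pos (by omega)]
    rw [List.range'_one, List.countP_cons, List.countP_nil]
    by_cases hn : (List.take k (List.drop l cs)).Nodup
    · rw [if_pos ((pvFlag_eq_zero_iff _).mpr hn)]
      simp [hn]
    · rw [if_neg (fun h0 => hn ((pvFlag_eq_zero_iff _).mp h0))]
      simp [hn]
  | succ m ih =>
    intro l acc h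
    rw [counterWindowLoopA]
    rw [if_neg (by omega)]
    rw [dif_pos (by omega : (l:Int)+(k:Int) < (cs.length:Int)+1)]
    simp only [PySem.List.slice_natCast_add]
    have hcast1 : (l : Int) + 1 = ((l + 1 : Nat) : Int) := by push_cast; ring
    have hcast2 : (l : Int) + (k : Int) + 1 = ((l + 1 : Nat) : Int) + (k : Int) := by push_cast; ring
    rw [hcast1, hcast2, ih (l+1) _ (by omega)]
    have hr : List.range' l (m + 1 + 1) = l :: List.range' (l+1) (m+1) := by rw [List.range'_succ]
    rw [hr, List.countP_cons]
    by_cases hn : (List.take k (List.drop l cs)).Nodup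
    · rw [if_pos ((pvFlag_eq_zero_iff _).mpr hn)]
      simp [hn]; push_cast; ring
    · rw [if_neg (fun h0 => hn ((pvFlag_eq_zero_iff _).mp h0))]
      simp [hn]

lemma pvInitB_inv (w : List Char) :
    ∀ (w0 : List Char) (d : PySem.Dict Char Int) (du : Int),
      (∀ c, d.getD c 0 = (List.count c w0 : Int)) → du = pvDupF w0 →
      (∀ c, (w.foldl counterWindowInitStepB (d, du)).1.getD c 0 = (List.count c (w0 ++ w) : Int)) ∧
        (w.foldl counterWindowInitStepB (d, du)).2 = pvDupF (w0 ++ w) := by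
  induction w with
  | nil => intro w0 d du h1 h2; simpa using ⟨h1, h2⟩
  | cons x w' ih =>
    intro w0 d du h1 h2
    rw [List.foldl_cons]
    have h1' : ∀ c, (d.insert x (d.getD x 0 + 1)).getD c 0 = (List.count c (w0 ++ [x]) : Int) := by
      intro c
      rw [PySem.Dict.getD_insert]
      by_cases hc : c = x
      · subst hc
        rw [if_pos rfl, h1, List.count_append]
        simp
      · rw [if_neg hc, h1, List.count_append]
        have h0 : List.count c [x] = 0 := List.count_eq_zero.mpr (by simp [hc])
        rw [h0]
        norm_num
    have h2' : (if d.getD x 0 + 1 = 2 then du + 1 else du) = pvDupF (w0 ++ [x]) := by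
      rw [pvDupF_append_singleton, h2, h1 x]
      by_cases hc : List.count x w0 = 1
      · rw [if_pos (by omega : (List.count x w0 : Int) + 1 = 2), if_pos hc]
      · rw [if_neg (by omega : ¬ ((List.count x w0 : Int) + 1 = 2)), if_neg hc]
        ring
    have := ih (w0 ++ [x]) _ _ h1' h2'
    simp only [counterWindowInitStepB] at *
    simpa [List.append_assoc] using this

lemma pvLoopB_eq (cs : List Char) (k : Nat) :
    ∀ (m l : Nat) (st : PySem.Dict Char Int × Int × Int), l + m + k = cs.length →
      (∀ c, st.1.getD c 0 = (List.count c ((cs.drop l).take k) : Int)) →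
      st.2.1 = pvDupF ((cs.drop l).take k) →
      ((PySem.List.pyRange (l : Int) ((cs.length : Int) - (k : Int) + 1) 1).foldl
          (counterWindowStepB cs (k : Int)) st).2.2
        = st.2.2 + (((List.range' l (m + 1)).countP (fun i => decide ((cs.drop i).take k).Nodup) : Nat) : Int) := by
  intro m
  induction m with
  | zero =>
    intro l st h h1 h2
    rw [PySem.List.pyRange_one_cons (by omega)]
    rw [List.foldl_cons]
    simp only [counterWindowStepB]
    rw [if_neg (by omega : ¬ ((l:Int) + (k:Int) < (cs.length : Int)))]
    have hnil : PySem.List.pyRange ((l:Int)+1) ((cs.length : Int) - (k:Int) + 1) 1 = [] := by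
      simp [PySem.List.pyRange]; omega
    rw [hnil, List.foldl_nil]
    rw [h2, List.range'_one, List.countP_cons, List.countP_nil]
    by_cases hn : ((cs.drop l).take k).Nodup
    · rw [if_pos ((pvDupF_eq_zero_iff _).mpr hn)]; simp [hn]
    · rw [if_neg (fun h0 => hn ((pvDupF_eq_zero_iff _).mp h0))]; simp [hn]
  | succ m ih =>
    intro l st h h1 h2
    rw [PySem.List.pyRange_one_cons (by omega)]
    rw [List.foldl_cons]
    simp only [counterWindowStepB]
    rw [if_pos (by omega : (l:Int) + (k:Int) < (cs.length : Int))]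
    have hlk : l + k < cs.length := by omega
    have hl : l < cs.length := by omega
    have hout : PySem.List.pyGetD cs (l : Int) ' ' = cs[l] := by
      rw [PySem.List.pyGetD_natCast, List.getD_eq_getElem _ _ hl]
    have hcast : (l : Int) + (k : Int) = ((l + k : Nat) : Int) := by push_cast; ring
    have hch : PySem.List.pyGetD cs ((l : Int) + (k : Int)) ' ' = cs[l + k] := by
      rw [hcast, PySem.List.pyGetD_natCast, List.getD_eq_getElem _ _ hlk]
    rw [hout, hch]
    have hcast1 : (l : Int) + 1 = ((l + 1 : Nat) : Int) := by push_cast; ring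
    rw [hcast1]
    refine (ih (l+1) _ (by omega) ?_ ?_).trans ?_
    · -- counts invariant at l+1
      intro c
      by_cases hk0 : k = 0
      · subst hk0
        rw [PySem.Dict.getD_insert, PySem.Dict.getD_insert, PySem.Dict.getD_insert]
        have hz : ∀ c', st.1.getD c' 0 = 0 := by intro c'; rw [h1]; simp
        simp only [List.take_zero, List.count_nil, Nat.cast_zero]
        split_ifs <;> simp_all
      · have hk1 : 1 ≤ k := by omega
        have hwin : (cs.drop l).take k = cs[l] :: (cs.drop (l+1)).take (k-1) := pvWin_head cs k l hk1 hl
        have hwin' : (cs.drop (l+1)).take k = (cs.drop (l+1)).take (k-1) ++ [cs[l+k]] := pvWin_next cs k l hk1 hlk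
        have hinner : ∀ c', (st.1.insert cs[l] (st.1.getD cs[l] 0 - 1)).getD c' 0
            = (List.count c' ((cs.drop (l+1)).take (k-1)) : Int) := by
          intro c'
          rw [PySem.Dict.getD_insert]
          by_cases hcx : c' = cs[l]
          · subst hcx
            rw [if_pos rfl, h1, hwin, List.count_cons_self]
            push_cast; ring
          · rw [if_neg hcx, h1, hwin]
            have hne : ¬ cs[l] = c' := fun hh => hcx hh.symm
            simp [hne]
        rw [PySem.Dict.getD_insert, hinner, hwin', List.count_append]
        by_cases hca : c = cs[l+k]
        · subst hca
          rw [if_pos rfl]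
          have hone : List.count cs[l+k] [cs[l+k]] = 1 := by simp
          rw [hone]
          push_cast; ring
        · rw [if_neg hca]
          have h0 : List.count c [cs[l+k]] = 0 := List.count_eq_zero.mpr (by simp [hca])
          rw [h0]
          norm_num
          exact hinner c
    · -- dups invariant at l+1
      by_cases hk0 : k = 0
      · subst hk0
        simp only [Nat.add_zero]
        have hz : ∀ c', st.1.getD c' 0 = 0 := by intro c'; rw [h1]; simp
        norm_num [PySem.Dict.getD_insert, hz, h2]
      · have hk1 : 1 ≤ k := by omega
        have hwin : (cs.drop l).take k = cs[l] :: (cs.drop (l+1)).take (k-1) := pvWin_head cs k l hk1 hl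
        have hwin' : (cs.drop (l+1)).take k = (cs.drop (l+1)).take (k-1) ++ [cs[l+k]] := pvWin_next cs k l hk1 hlk
        have hinner : ∀ c', (st.1.insert cs[l] (st.1.getD cs[l] 0 - 1)).getD c' 0
            = (List.count c' ((cs.drop (l+1)).take (k-1)) : Int) := by
          intro c'
          rw [PySem.Dict.getD_insert]
          by_cases hcx : c' = cs[l]
          · subst hcx
            rw [if_pos rfl, h1, hwin, List.count_cons_self]
            push_cast; ring
          · rw [if_neg hcx, h1, hwin]
            have hne : ¬ cs[l] = c' := fun hh => hcx hh.symm
            simp [hne]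
        rw [hinner, hwin', pvDupF_append_singleton, h2, hwin, pvDupF_cons, h1, hwin, List.count_cons_self]
        push_cast
        split_ifs <;> omega
    · -- recombine the counts
      dsimp only
      conv_rhs => rw [List.range'_succ, List.countP_cons]
      rw [h2]
      by_cases hn : ((cs.drop l).take k).Nodup
      · rw [if_pos ((pvDupF_eq_zero_iff _).mpr hn), if_pos (by simpa using hn)]
        push_cast; ring
      · rw [if_neg (fun h0 => hn ((pvDupF_eq_zero_iff _).mp h0)), if_neg (by simpa using hn)]
        push_cast; ring

-- ===== VERDICT (by name: the statement is the Claim_ definition above) =====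
theorem counter_window_spec : Claim_equal_counter_window := by
  intro s k _ hpre
  unfold Spec_counter_window counter_window counter_window_alt
  by_cases hlt : (s.toList.length : Int) < k
  · rw [if_pos hlt, if_pos hlt]
  · rw [if_neg hlt, if_neg hlt]
    obtain ⟨K, rfl⟩ : ∃ K : Nat, k = (K : Int) := ⟨k.toNat, (Int.toNat_of_nonneg hpre).symm⟩
    have hK : K ≤ s.toList.length := by exact_mod_cast not_lt.mp hlt
    have hA : counterWindowLoopA s.toList 0 (K : Int) 0
        = 0 + (((List.range' 0 (s.toList.length - K + 1)).countP
            (fun i => decide ((s.toList.drop i).take K).Nodup) : Nat) : Int) := by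
      have := pvLoopA_eq s.toList K (s.toList.length - K) 0 0 (by omega)
      simpa using this
    have hslice : PySem.List.slice s.toList none (some (K : Int)) = (s.toList.drop 0).take K := by
      rw [PySem.List.slice_to _ (by positivity)]
      simp
    have hinit := pvInitB_inv (PySem.List.slice s.toList none (some (K : Int))) []
      PySem.Dict.empty 0 (fun c => by simp [PySem.Dict.getD_empty]) (by simp [pvDupF_nil])
    rw [hslice] at hinit
    have hB := pvLoopB_eq s.toList K (s.toList.length - K) 0
      ((counterWindowInitB s.toList (K : Int)).1, (counterWindowInitB s.toList (K : Int)).2, 0)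
      (by omega)
      (by
        intro c
        have := hinit.1 c
        simpa [counterWindowInitB, hslice] using this)
      (by
        have := hinit.2
        simpa [counterWindowInitB, hslice] using this)
    simp only [Nat.cast_zero] at hB
    simp only [hA, hB]
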